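-- pv_equiv track=rewrite | github.com/ivan-chekunkov/Stepic | Generation_python_course_for_professional/topic_2.py | choose_plural
-- ===== SOURCE A (Python) =====
-- def choose_plural(amount: int, declensions: tuple) -> str:
--     index_declensions = {
--         0: (1,),
--         1: (2, 3, 4,),
--         2: (5, 6, 7, 8, 9, 0,),
--     }
--     numbers_end = int(str(amount)[-2:])
--     if numbers_end in (11, 12, 13, 14,):
--         return f'{amount} {declensions[2]}'
--     number_end = int(str(amount)[-1])
--     for key, value in index_declensions.items():
--         if number_end in value:
--             return f'{amount} {declensions[key]}'
--     return 'Ошибка'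
-- ===== SOURCE B (Python) =====
-- def choose_plural(amount: int, declensions: tuple) -> str:
--     n = abs(amount) % 100
--     if n % 10 == 1 and n != 11:
--         form = declensions[0]
--     elif 2 <= n % 10 <= 4 and not 12 <= n <= 14:
--         form = declensions[1]
--     else:
--         form = declensions[2]
--     return f'{amount} {form}'
-- ===== Notes on version B (the rewrite author's own statement) =====
-- stated objective: simpler
-- what changed: Replaces A's string slicing of str(amount) plus the index->digit-group dict and membership-scan loop by the standard arithmetic declension formula on n = abs(amount) % 100: three range/equality comparisons (n%10==1 and n!=11; 2<=n%10<=4 and not 12<=n<=14; else), no string conversion, no tables, no loop.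
import Mathlib
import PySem

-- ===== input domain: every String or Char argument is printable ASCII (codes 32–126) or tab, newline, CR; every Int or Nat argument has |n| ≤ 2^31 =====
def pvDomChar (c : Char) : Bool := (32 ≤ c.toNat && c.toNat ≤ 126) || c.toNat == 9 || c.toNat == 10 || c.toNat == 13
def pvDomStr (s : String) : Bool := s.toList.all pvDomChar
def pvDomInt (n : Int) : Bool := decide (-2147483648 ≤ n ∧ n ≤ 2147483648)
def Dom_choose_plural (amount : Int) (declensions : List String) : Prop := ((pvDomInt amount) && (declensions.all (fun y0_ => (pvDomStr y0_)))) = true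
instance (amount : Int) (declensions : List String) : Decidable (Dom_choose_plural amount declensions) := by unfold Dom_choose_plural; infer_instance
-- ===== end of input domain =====

-- B replaces A's str-slicing + digit-group dict + membership-scan loop by the standard arithmetic declension formula on abs(amount) % 100 (simpler).


-- ===== PORT A =====
-- the 'for key, value in index_declensions.items(): … return …' loop, with early return
def chooseLoopA (amount : Int) (declensions : List String) (number_end : Int) :
    List (Int × List Int) → String
  | [] => "Ошибка"
  | (key, value) :: rest =>
      if number_end ∈ value then
        PySem.Int.toStr amount ++ " " ++ ((PySem.List.pyGet? declensions key).getD "")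
      else chooseLoopA amount declensions number_end rest

def choose_plural (amount : Int) (declensions : List String) : String :=
  let index_declensions : List (Int × List Int) := [(0, [1]), (1, [2, 3, 4]), (2, [5, 6, 7, 8, 9, 0])]
  let s := PySem.Int.toChars amount
  -- int(str(amount)[-2:]) : the slice of a decimal string always parses, so getD 0 is unreachable
  let numbers_end := (PySem.Int.ofChars? (PySem.List.slice s (some (-2)) none)).getD 0
  if numbers_end ∈ ([11, 12, 13, 14] : List Int) then
    PySem.Int.toStr amount ++ " " ++ ((PySem.List.pyGet? declensions 2).getD "")
  else
    -- int(str(amount)[-1]) : str(amount) is nonempty and its last char is a digit, so none/getD 0 are unreachable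
    let number_end :=
      match PySem.List.pyGet? s (-1) with
      | some c => (PySem.Int.ofChars? [c]).getD 0
      | none => 0
    chooseLoopA amount declensions number_end index_declensions

-- ===== PORT B =====
def choose_plural_alt (amount : Int) (declensions : List String) : String :=
  let n := PySem.Int.mod (amount.natAbs : Int) 100
  let form :=
    if PySem.Int.mod n 10 = 1 ∧ n ≠ 11 then
      (PySem.List.pyGet? declensions 0).getD ""
    else if (2 ≤ PySem.Int.mod n 10 ∧ PySem.Int.mod n 10 ≤ 4) ∧ ¬(12 ≤ n ∧ n ≤ 14) then
      (PySem.List.pyGet? declensions 1).getD ""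
    else
      (PySem.List.pyGet? declensions 2).getD ""
  PySem.Int.toStr amount ++ " " ++ form

-- ===== PRECONDITION & SPEC =====
-- Pre_ excludes exactly the inputs where A raises IndexError: declensions shorter than the
-- one index A accesses (which depends only on the last one/two decimal digits of amount).
def Pre_choose_plural (amount : Int) (declensions : List String) : Prop :=
  (if amount.natAbs % 100 ∈ [11, 12, 13, 14] then 2
   else if amount.natAbs % 10 = 1 then 0
   else if amount.natAbs % 10 ∈ [2, 3, 4] then 1
   else 2) < declensions.length
instance (amount : Int) (declensions : List String) : Decidable (Pre_choose_plural amount declensions) := by unfold Pre_choose_plural; infer_instance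
def pvWitness_choose_plural : Int × List String := (21, ["item", "items_few", "items_many"])

def Spec_choose_plural (amount : Int) (declensions : List String) (out : String) : Prop := out = choose_plural_alt amount declensions
instance (amount : Int) (declensions : List String) (out : String) : Decidable (Spec_choose_plural amount declensions out) := by unfold Spec_choose_plural; infer_instance

-- ===== CLAIM (what is proved, stated in full; the proofs are below) =====
def Claim_equal_choose_plural : Prop := ∀ (amount : Int) (declensions : List String), Dom_choose_plural amount declensions → Pre_choose_plural amount declensions → Spec_choose_plural amount declensions (choose_plural amount declensions)

-- ===== LEMMAS AND PROOFS =====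

-- the accumulator of Nat.toDigitsCore is a pure suffix of its result
lemma toDigitsCore_acc (f : Nat) : ∀ (n : Nat) (ds : List Char), n < f →
    Nat.toDigitsCore 10 f n ds = Nat.toDigitsCore 10 f n [] ++ ds := by
  induction f with
  | zero => intro n ds h; omega
  | succ f ih =>
      intro n ds _
      by_cases h0 : n / 10 = 0
      · simp [Nat.toDigitsCore, h0]
      · have hn : 10 ≤ n := by
          rcases Nat.lt_or_ge n 10 with h | h
          · exact absurd (Nat.div_eq_of_lt h) h0
          · exact h
        have hlt : n / 10 < f := by
          have := Nat.div_lt_self (by omega : 0 < n) (by omega : 1 < 10)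
          omega
        simp only [Nat.toDigitsCore, h0, if_false]
        rw [ih (n / 10) ((n % 10).digitChar :: ds) hlt,
            ih (n / 10) [(n % 10).digitChar] hlt, List.append_assoc]
        rfl

-- the fuel of Nat.toDigitsCore is irrelevant once it exceeds n
lemma toDigitsCore_fuel : ∀ (f f' n : Nat) (ds : List Char), n < f → n < f' →
    Nat.toDigitsCore 10 f n ds = Nat.toDigitsCore 10 f' n ds := by
  intro f
  induction f with
  | zero => intro f' n ds h _; omega
  | succ f ih =>
      intro f' n ds hf hf'
      cases f' with
      | zero => omega
      | succ f' =>
          by_cases h0 : n / 10 = 0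
          · simp [Nat.toDigitsCore, h0]
          · have hn : 10 ≤ n := by
              rcases Nat.lt_or_ge n 10 with h | h
              · exact absurd (Nat.div_eq_of_lt h) h0
              · exact h
            simp only [Nat.toDigitsCore, h0, if_false]
            exact ih f' (n / 10) _ (by omega) (by omega)

-- str(m) for a natural m ends in the digit char of m % 10
lemma toDigits_last (m : Nat) :
    ∃ X, Nat.toDigits 10 m = X ++ [(m % 10).digitChar] := by
  unfold Nat.toDigits
  by_cases h0 : m / 10 = 0
  · exact ⟨[], by simp [Nat.toDigitsCore, h0]⟩
  · have hlt : m / 10 < m := Nat.div_lt_self (by omega) (by omega)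
    simp only [Nat.toDigitsCore, h0, if_false]
    exact ⟨Nat.toDigitsCore 10 m (m / 10) [], by
      rw [toDigitsCore_acc m (m / 10) [(m % 10).digitChar] (by omega)]⟩

-- str(m) for m ≥ 10 ends in the digit chars of m / 10 % 10 and m % 10
lemma toDigits_last2 (m : Nat) (hm : 10 ≤ m) :
    ∃ X, Nat.toDigits 10 m = X ++ [(m / 10 % 10).digitChar, (m % 10).digitChar] := by
  have h0 : ¬ m / 10 = 0 := by
    intro h
    have := Nat.div_eq_of_lt (show m < 10 by omega)
    omega
  unfold Nat.toDigits
  simp only [Nat.toDigitsCore, h0, if_false]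
  rw [toDigitsCore_acc m (m / 10) [(m % 10).digitChar]
      (Nat.div_lt_self (by omega) (by omega))]
  obtain ⟨X, hX⟩ := toDigits_last (m / 10)
  unfold Nat.toDigits at hX
  rw [toDigitsCore_fuel m (m / 10 + 1) (m / 10) []
      (Nat.div_lt_self (by omega) (by omega)) (by omega), hX]
  exact ⟨X, by simp⟩

-- int(c) of a single digit char reads back the digit
lemma ofChars_digitChar (d : Nat) (hd : d < 10) :
    PySem.Int.ofChars? [d.digitChar] = some (d : Int) := by
  interval_cases d <;> rfl

-- int(cd) of two digit chars reads back the two-digit number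
lemma ofChars_digitChar2 (c d : Nat) (hc : c < 10) (hd : d < 10) :
    PySem.Int.ofChars? [c.digitChar, d.digitChar] = some ((10 * c + d : Nat) : Int) := by
  interval_cases c <;> interval_cases d <;> rfl

-- str(amount)[-1] is the digit char of |amount| % 10
lemma pyGet_toChars_last (amount : Int) :
    PySem.List.pyGet? (PySem.Int.toChars amount) (-1)
      = some ((amount.natAbs % 10).digitChar) := by
  rw [PySem.List.pyGet?_neg_one]
  unfold PySem.Int.toChars
  obtain ⟨X, hX⟩ := toDigits_last amount.natAbs
  by_cases h : amount < 0
  · simp only [h, if_true]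
    rw [hX, ← List.cons_append, List.getLast?_append]
    simp
  · simp only [h, if_false]
    have : amount.toNat = amount.natAbs := by omega
    rw [this, hX, List.getLast?_append]
    simp

-- int(str(amount)[-2:]) for |amount| ≥ 10 is |amount| % 100
lemma numbers_end_ge10 (amount : Int) (h10 : 10 ≤ amount.natAbs) :
    PySem.Int.ofChars? (PySem.List.slice (PySem.Int.toChars amount) (some (-2)) none)
      = some ((amount.natAbs % 100 : Nat) : Int) := by
  obtain ⟨X, hX⟩ := toDigits_last2 amount.natAbs h10
  have hs : ∃ Y, PySem.Int.toChars amount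
      = Y ++ [(amount.natAbs / 10 % 10).digitChar, (amount.natAbs % 10).digitChar] := by
    unfold PySem.Int.toChars
    by_cases h : amount < 0
    · exact ⟨'-' :: X, by simp [h, hX]⟩
    · have : amount.toNat = amount.natAbs := by omega
      exact ⟨X, by simp [h, this, hX]⟩
  obtain ⟨Y, hY⟩ := hs
  rw [PySem.List.slice_from_neg_ofNat _ 2 (by omega), hY]
  have hlen : (Y ++ [(amount.natAbs / 10 % 10).digitChar, (amount.natAbs % 10).digitChar]).length
      = Y.length + 2 := by simp
  rw [hlen]
  have h2 : Y.length + 2 - 2 = Y.length := by omega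
  rw [h2, List.drop_left]
  rw [ofChars_digitChar2 _ _ (Nat.mod_lt _ (by omega)) (Nat.mod_lt _ (by omega))]
  congr 2
  omega

-- int(str(amount)[-2:]) is in {11,…,14} iff |amount| % 100 is
lemma numbers_end_mem (amount : Int) :
    ((PySem.Int.ofChars? (PySem.List.slice (PySem.Int.toChars amount) (some (-2)) none)).getD 0
        ∈ ([11, 12, 13, 14] : List Int))
      ↔ (amount.natAbs % 100 ∈ ([11, 12, 13, 14] : List Nat)) := by
  rcases Nat.lt_or_ge amount.natAbs 10 with h | h
  · have hb1 : -9 ≤ amount := by omega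
    have hb2 : amount ≤ 9 := by omega
    have hv : (PySem.Int.ofChars? (PySem.List.slice (PySem.Int.toChars amount) (some (-2)) none)).getD 0 = amount := by
      interval_cases amount <;> rfl
    constructor
    · intro hmem
      exfalso
      rw [hv] at hmem
      simp only [List.mem_cons, List.not_mem_nil, or_false] at hmem
      omega
    · intro hmem
      exfalso
      have hlt : amount.natAbs % 100 = amount.natAbs := Nat.mod_eq_of_lt (by omega)
      rw [hlt] at hmem
      simp only [List.mem_cons, List.not_mem_nil, or_false] at hmem
      omega
  · rw [numbers_end_ge10 amount h]
    simp only [Option.getD_some, List.mem_cons, List.not_mem_nil, or_false]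
    constructor
    · intro hmem
      rcases hmem with h' | h' | h' | h' <;> omega
    · intro hmem
      rcases hmem with h' | h' | h' | h'
      · left; omega
      · right; left; omega
      · right; right; left; omega
      · right; right; right; omega

-- ===== VERDICT (by name: the statement is the Claim_ definition above) =====
theorem choose_plural_spec : Claim_equal_choose_plural := by
  intro amount declensions _ _
  unfold Spec_choose_plural choose_plural choose_plural_alt
  simp only []
  rw [pyGet_toChars_last amount]
  rw [show PySem.Int.mod ((amount.natAbs : Nat) : Int) 100 = ((amount.natAbs % 100 : Nat) : Int)
      from PySem.Int.mod_natCast _ _]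
  rw [show PySem.Int.mod ((amount.natAbs % 100 : Nat) : Int) 10
        = ((amount.natAbs % 100 % 10 : Nat) : Int) from PySem.Int.mod_natCast _ _]
  rw [show amount.natAbs % 100 % 10 = amount.natAbs % 10 from Nat.mod_mod_of_dvd _ (by norm_num)]
  by_cases h14 : amount.natAbs % 100 ∈ ([11, 12, 13, 14] : List Nat)
  · rw [if_pos ((numbers_end_mem amount).mpr h14)]
    simp only [List.mem_cons, List.not_mem_nil, or_false] at h14
    rw [if_neg (by omega), if_neg (by omega)]
  · rw [if_neg (fun hc => h14 ((numbers_end_mem amount).mp hc))]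
    simp only [List.mem_cons, List.not_mem_nil, or_false] at h14
    rw [show (match some ((amount.natAbs % 10).digitChar) with
          | some c => (PySem.Int.ofChars? [c]).getD 0
          | none => (0 : Int))
        = (PySem.Int.ofChars? [(amount.natAbs % 10).digitChar]).getD 0 from rfl]
    rw [ofChars_digitChar (amount.natAbs % 10) (Nat.mod_lt _ (by omega))]
    simp only [Option.getD_some]
    have hd10 : amount.natAbs % 10 < 10 := Nat.mod_lt _ (by omega)
    obtain ⟨d, hdlt, hd⟩ : ∃ d, d < 10 ∧ amount.natAbs % 10 = d := ⟨_, hd10, rfl⟩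
    rw [hd]
    interval_cases d <;> split_ifs with hA hB <;>
      first
        | (exfalso; omega)
        | norm_num [chooseLoopA]
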